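-- pv_equiv track=rewrite | github.com/FlaBBB/Cybers_security | CTF/2024/Viswa-CTF/Cryptography/BitBane - Cryptic Chaos/Encrypt.py | create_base
-- ===== SOURCE A (Python) =====
-- def create_base(not_remainder):
--     num = 0
--     for _ in range(30):
--         if not_remainder:
--             num |= not_remainder & 1
--             not_remainder >>= 1
--         num <<= 1
--     return num
-- ===== SOURCE B (Python) =====
-- def create_base(not_remainder):
--     m = not_remainder % (1 << 30)
--     return sum(((m >> i) & 1) << (30 - i) for i in range(30))
-- ===== Notes on version B (the rewrite author's own statement) =====
-- stated objective: simpler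
-- what changed: Replaces A's stateful thirty-round OR/shift loop (with a truthiness guard and destructive shifting of the argument) by a one-line positional formula: reduce the input modulo two-to-the-thirtieth and sum each bit with its reversed weight.
import Mathlib
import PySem

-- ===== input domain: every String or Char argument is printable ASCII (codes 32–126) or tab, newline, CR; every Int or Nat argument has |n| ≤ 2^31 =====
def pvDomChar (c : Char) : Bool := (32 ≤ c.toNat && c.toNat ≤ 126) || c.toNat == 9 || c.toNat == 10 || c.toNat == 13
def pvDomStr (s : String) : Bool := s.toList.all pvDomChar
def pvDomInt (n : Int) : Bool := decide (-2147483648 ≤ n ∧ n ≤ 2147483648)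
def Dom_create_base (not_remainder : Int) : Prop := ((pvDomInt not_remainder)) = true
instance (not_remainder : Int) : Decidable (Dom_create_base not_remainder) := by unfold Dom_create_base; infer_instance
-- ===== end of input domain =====

-- B replaces A's stateful thirty-round OR/shift loop by a positional formula: reduce the input
-- modulo two-to-the-thirtieth and sum each bit with its reversed weight (objective: simpler; same cost).

-- ===== PORT A =====
def create_base (not_remainder : Int) : Int :=
  ((List.range 30).foldl (fun (st : Int × Int) (_ : Nat) =>
      if st.2 ≠ 0 then ((PySem.Int.bor st.1 (PySem.Int.band st.2 1)) <<< (1 : Nat), st.2 >>> (1 : Nat))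
      else (st.1 <<< (1 : Nat), st.2)) ((0 : Int), not_remainder)).1

-- ===== PORT B =====
def create_base_alt (not_remainder : Int) : Int :=
  let m : Int := PySem.Int.mod not_remainder ((1 : Int) <<< (30 : Nat))
  ((List.range 30).map (fun (i : Nat) => (PySem.Int.band (m >>> i) 1) <<< (30 - i))).sum

-- ===== PRECONDITION & SPEC =====
def Spec_create_base (not_remainder : Int) (out : Int) : Prop := out = create_base_alt not_remainder
instance (not_remainder : Int) (out : Int) : Decidable (Spec_create_base not_remainder out) := by unfold Spec_create_base; infer_instance

-- ===== CLAIM (what is proved, stated in full; the proofs are below) =====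
def Claim_equal_create_base : Prop := ∀ (not_remainder : Int), Dom_create_base not_remainder → Spec_create_base not_remainder (create_base not_remainder)

-- ===== LEMMAS AND PROOFS =====

-- A's loop body as a function of the state
def pvStep (st : Int × Int) : Int × Int :=
  if st.2 ≠ 0 then ((PySem.Int.bor st.1 (PySem.Int.band st.2 1)) <<< (1 : Nat), st.2 >>> (1 : Nat))
  else (st.1 <<< (1 : Nat), st.2)

-- A's loop in plain arithmetic
def pvLoopN : Nat → Int → Int → Int
  | 0, num, _ => num
  | k+1, num, nr => pvLoopN k ((num + nr % 2) * 2) (nr / 2)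

lemma pvNatLorOne (m : Nat) : (2 * m) ||| 1 = 2 * m + 1 := by
  have h := Nat.lor_bit false m true 0
  simpa [Nat.bit] using h

lemma pvBorEven (a : Int) (h : 2 ∣ a) : PySem.Int.bor a 1 = a + 1 := by
  unfold PySem.Int.bor
  by_cases ha : 0 ≤ a
  · obtain ⟨m, hm⟩ : ∃ m : Nat, a = 2 * m := by
      obtain ⟨c, hc⟩ := h; exact ⟨c.toNat, by omega⟩
    subst hm
    rw [if_pos ha, if_pos (by norm_num : (0:Int) ≤ 1)]
    have h1 : ((2 * (m : Int))).toNat = 2 * m := by omega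
    have h2 : ((1 : Int)).toNat = 1 := rfl
    rw [h1, h2, pvNatLorOne]
    push_cast; ring
  · rw [if_neg ha, if_pos (by norm_num : (0:Int) ≤ 1)]
    obtain ⟨m, hm⟩ : ∃ m : Nat, (-a - 1).toNat = 2 * m + 1 := by
      obtain ⟨c, hc⟩ := h; exact ⟨(-c - 1).toNat, by omega⟩
    have h2 : ((1 : Int)).toNat = 1 := rfl
    rw [hm, h2]
    have hand : (2 * m + 1) &&& 1 = 1 := by rw [Nat.and_one_is_mod]; omega
    rw [hand]
    omega

lemma pvFoldlConst (l : List Nat) (s : Int × Int) :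
    List.foldl (fun st (_ : Nat) => pvStep st) s l = pvStep^[l.length] s := by
  induction l generalizing s with
  | nil => rfl
  | cons a l ih => simp [List.foldl, ih, Function.iterate_succ_apply]

lemma pvStep_arith (st : Int × Int) (h : 2 ∣ st.1) :
    pvStep st = ((st.1 + st.2 % 2) * 2, st.2 / 2) := by
  obtain ⟨num, nr⟩ := st
  simp only [pvStep]
  by_cases hz : nr = 0
  · subst hz
    rw [if_neg (fun hc => hc rfl), Prod.mk.injEq]
    exact ⟨by rw [Int.shiftLeft_eq]; norm_num, by norm_num⟩
  · rw [if_pos hz, PySem.Int.band_one, PySem.Int.mod_eq_emod_of_pos (by norm_num)]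
    have hsr : nr >>> (1 : Nat) = nr / 2 := by
      have := Int.shiftRight_eq_div_pow nr 1
      simpa using this
    have h2 : nr % 2 = 0 ∨ nr % 2 = 1 := by omega
    rcases h2 with h2 | h2 <;> rw [h2]
    · rw [PySem.Int.bor_zero, Prod.mk.injEq]
      exact ⟨by rw [Int.shiftLeft_eq]; ring, hsr⟩
    · rw [pvBorEven _ h, Prod.mk.injEq]
      exact ⟨by rw [Int.shiftLeft_eq]; ring, hsr⟩

lemma pvIter_eq_loopN (k : Nat) (num nr : Int) (h : 2 ∣ num) :
    (pvStep^[k] (num, nr)).1 = pvLoopN k num nr := by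
  induction k generalizing num nr with
  | zero => rfl
  | succ k ih =>
    rw [Function.iterate_succ_apply, pvStep_arith _ h]
    exact ih _ _ ⟨(num + nr % 2), by ring⟩

lemma pvLoopN_closed (k : Nat) (num nr : Int) :
    pvLoopN k num nr =
      num * 2 ^ k + ((List.range k).map (fun i => nr / 2 ^ i % 2 * 2 ^ (k - i))).sum := by
  induction k generalizing num nr with
  | zero => simp [pvLoopN]
  | succ k ih =>
    rw [pvLoopN, ih, List.range_succ_eq_map]
    simp only [List.map_cons, List.map_map, List.sum_cons, Function.comp_def,
      Nat.succ_eq_add_one]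
    have hmap : (List.range k).map (fun i => nr / 2 / 2 ^ i % 2 * 2 ^ (k - i)) =
        (List.range k).map (fun i => nr / 2 ^ (i + 1) % 2 * 2 ^ (k + 1 - (i + 1))) := by
      apply List.map_congr_left
      intro i _
      rw [Int.ediv_ediv_of_nonneg (by norm_num : (0:Int) ≤ 2), ← pow_succ']
      congr 2
      omega
    rw [hmap]
    simp only [pow_zero, Int.ediv_one, Nat.sub_zero]
    rw [pow_succ]
    ring

lemma pvBitTransfer (a : Int) (i K : Nat) (h : i < K) :
    (a % 2 ^ K) / 2 ^ i % 2 = a / 2 ^ i % 2 := by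
  have key : ∀ q r : Int, (2 ^ K * q + r) / 2 ^ i % 2 = r / 2 ^ i % 2 := by
    intro q r
    have hK : (2 : Int) ^ K = 2 ^ i * 2 ^ (K - i) := by
      rw [← pow_add]; congr 1; omega
    have h1 : 2 ^ K * q + r = r + 2 ^ (K - i) * q * 2 ^ i := by rw [hK]; ring
    rw [h1, Int.add_mul_ediv_right _ _ (by positivity : (2:Int) ^ i ≠ 0)]
    obtain ⟨d, hd⟩ : (2 : Int) ∣ 2 ^ (K - i) := dvd_pow_self 2 (by omega : K - i ≠ 0)
    have h2 : r / 2 ^ i + 2 ^ (K - i) * q = r / 2 ^ i + 2 * (d * q) := by rw [hd]; ring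
    rw [h2, Int.add_mul_emod_self_left]
  have ha : a = 2 ^ K * (a / 2 ^ K) + a % 2 ^ K := by
    have := Int.emod_add_mul_ediv a (2 ^ K); linarith
  conv_rhs => rw [ha]
  rw [key]

lemma pvAltEq (nr : Int) :
    create_base_alt nr =
      ((List.range 30).map (fun i => (nr % 2 ^ 30) / 2 ^ i % 2 * 2 ^ (30 - i))).sum := by
  have hm : PySem.Int.mod nr ((1 : Int) <<< (30 : Nat)) = nr % 2 ^ 30 := by
    rw [PySem.Int.mod_eq_emod_of_pos (by decide)]
    norm_num [Int.shiftLeft_eq]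
  simp only [create_base_alt, hm]
  congr 1
  apply List.map_congr_left
  intro i _
  rw [PySem.Int.band_one, PySem.Int.mod_eq_emod_of_pos (by norm_num),
    Int.shiftRight_eq_div_pow, Int.shiftLeft_eq]
  norm_cast

-- ===== VERDICT (by name: the statement is the Claim_ definition above) =====
theorem create_base_spec : Claim_equal_create_base := by
  intro nr _
  unfold Spec_create_base
  have hA : create_base nr = (pvStep^[(List.range 30).length] ((0 : Int), nr)).1 := by
    rw [← pvFoldlConst]; rfl
  rw [hA]
  simp only [List.length_range]
  rw [pvIter_eq_loopN 30 0 nr ⟨0, by ring⟩, pvLoopN_closed, pvAltEq]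
  rw [zero_mul, zero_add]
  congr 1
  apply List.map_congr_left
  intro i hi
  rw [pvBitTransfer nr i 30 (List.mem_range.mp hi)]
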